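-- pv_equiv track=rewrite | github.com/sinbc2003/webnumbergame | backend/app/game/special_game.py | count_symbol_usage
-- ===== SOURCE A (Python) =====
-- ALLOWED_SINGLE_TOKENS = {"1", "+", "-", "*", "(", ")"}
--
-- class SpecialExpressionError(ValueError):
--     """Raised when the player input violates special game constraints."""
--
-- def count_symbol_usage(expression: str) -> int:
--     count = 0
--     idx = 0
--     length = len(expression)
--     while idx < length:
--         if expression.startswith("**", idx):
--             count += 1
--             idx += 2
--             continue
--         token = expression[idx]
--         if token not in ALLOWED_SINGLE_TOKENS:
--             raise SpecialExpressionError("허용되지 않은 기호가 포함되어 있습니다.")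
--         count += 1
--         idx += 1
--     return count
-- ===== SOURCE B (Python) =====
-- ALLOWED_SINGLE_TOKENS = {"1", "+", "-", "*", "(", ")"}
--
-- class SpecialExpressionError(ValueError):
--     """Raised when the player input violates special game constraints."""
--
-- def count_symbol_usage(expression: str) -> int:
--     if any(ch not in ALLOWED_SINGLE_TOKENS for ch in expression):
--         raise SpecialExpressionError("허용되지 않은 기호가 포함되어 있습니다.")
--     return len(expression) - expression.count("**")
-- ===== Notes on version B (the rewrite author's own statement) =====
-- stated objective: simpler
-- what changed: Replaces the index-stepping scanner (startswith('**') branch, manual idx advance) with a one-pass character validation followed by the closed form len(expression) - expression.count('**'), which matches the scanner because str.count counts non-overlapping occurrences left to right.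
import Mathlib
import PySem

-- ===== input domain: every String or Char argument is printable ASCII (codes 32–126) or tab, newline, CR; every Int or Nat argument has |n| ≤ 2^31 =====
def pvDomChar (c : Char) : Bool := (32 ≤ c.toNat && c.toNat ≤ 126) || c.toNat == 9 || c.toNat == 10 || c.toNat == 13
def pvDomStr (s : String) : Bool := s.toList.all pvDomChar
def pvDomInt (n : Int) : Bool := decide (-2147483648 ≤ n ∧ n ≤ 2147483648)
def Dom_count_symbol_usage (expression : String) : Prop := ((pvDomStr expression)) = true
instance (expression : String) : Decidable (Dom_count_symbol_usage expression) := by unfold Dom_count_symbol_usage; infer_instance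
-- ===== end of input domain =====

-- B changes the algorithm: one validation pass plus the closed form len - count("**"), instead of A's index-stepping scan (objective: simpler).
-- ===== PORT A =====
-- ALLOWED_SINGLE_TOKENS (a Python set of one-character strings, held as a set of chars)
def pvAllowedTokens : PySem.Set Char := PySem.Set.ofList ['1', '+', '-', '*', '(', ')']

-- the while loop over idx, as recursion on the remaining characters; 'none' = SpecialExpressionError
def csuGo : List Char → Int → Option Int
  | [], count => some count
  | [c], count =>        -- startswith("**", idx) is false with one char left
      if pvAllowedTokens.contains c then some (count + 1) else none
  | c1 :: c2 :: rest, count =>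
      if c1 = '*' ∧ c2 = '*' then csuGo rest (count + 1)
      else if pvAllowedTokens.contains c1 then csuGo (c2 :: rest) (count + 1) else none

def count_symbol_usage (expression : String) : Int :=
  (csuGo expression.toList 0).getD 0    -- the raise is outside Pre_; 0 is a dummy there

-- ===== PORT B =====
def count_symbol_usage_alt (expression : String) : Int :=
  if expression.toList.any (fun ch => !(pvAllowedTokens.contains ch)) then
    0    -- SpecialExpressionError, outside Pre_; 0 is a dummy there
  else
    (PySem.Str.len expression : Int) - (PySem.Str.count expression "**" : Int)

-- ===== PRECONDITION & SPEC =====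
-- Pre_ excludes exactly the inputs on which A raises SpecialExpressionError: a character outside ALLOWED_SINGLE_TOKENS.
def Pre_count_symbol_usage (expression : String) : Prop :=
  expression.toList.all (fun ch => pvAllowedTokens.contains ch) = true
instance (expression : String) : Decidable (Pre_count_symbol_usage expression) := by
  unfold Pre_count_symbol_usage; infer_instance
def pvWitness_count_symbol_usage : String := "1**(1+1)-1*1"

def Spec_count_symbol_usage (expression : String) (out : Int) : Prop := out = count_symbol_usage_alt expression
instance (expression : String) (out : Int) : Decidable (Spec_count_symbol_usage expression out) := by unfold Spec_count_symbol_usage; infer_instance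

-- ===== CLAIM (what is proved, stated in full; the proofs are below) =====
def Claim_equal_count_symbol_usage : Prop := ∀ (expression : String), Dom_count_symbol_usage expression → Pre_count_symbol_usage expression → Spec_count_symbol_usage expression (count_symbol_usage expression)

-- ===== LEMMAS AND PROOFS =====

-- greedy non-overlapping count of "**", recursing exactly as A's scanner steps
def pvStarPairs : List Char → Nat
  | [] => 0
  | [_] => 0
  | c1 :: c2 :: rest =>
      if c1 = '*' ∧ c2 = '*' then pvStarPairs rest + 1 else pvStarPairs (c2 :: rest)

theorem pvStarPairs_le (l : List Char) : pvStarPairs l ≤ l.length := by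
  fun_induction pvStarPairs l <;> simp_all <;> omega

theorem csuGo_eq (l : List Char) (count : Int)
    (h : ∀ c ∈ l, pvAllowedTokens.contains c = true) :
    csuGo l count = some (count + (l.length : Int) - (pvStarPairs l : Int)) := by
  fun_induction csuGo l count with
  | case1 count => simp [pvStarPairs]
  | case2 c count hc =>
      simp [pvStarPairs]
  | case3 c count hc =>
      exact absurd (h c (by simp)) (by simpa using hc)
  | case4 c1 c2 rest count hstar ih =>
      rw [ih (fun c hc => h c (by simp [hc]))]
      obtain ⟨h1, h2⟩ := hstar
      subst h1; subst h2
      have hp : pvStarPairs ('*' :: '*' :: rest) = pvStarPairs rest + 1 := by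
        simp [pvStarPairs]
      rw [hp]
      simp only [Option.some.injEq, List.length_cons]
      have := pvStarPairs_le rest
      push_cast; omega
  | case5 c1 c2 rest count hstar hc ih =>
      rw [ih (fun c hc => h c (by simp at hc ⊢; tauto))]
      have hp : pvStarPairs (c1 :: c2 :: rest) = pvStarPairs (c2 :: rest) := by
        simp [pvStarPairs, hstar]
      rw [hp]
      simp only [Option.some.injEq, List.length_cons]
      have := pvStarPairs_le (c2 :: rest)
      simp only [List.length_cons] at this
      push_cast; omega
  | case6 c1 c2 rest count hstar hc =>
      exact absurd (h c1 (by simp)) (by simpa using hc)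

-- PySem's str.count("**") counts exactly the greedy non-overlapping pairs
theorem countGo_eq (fuel : Nat) (l : List Char) (acc : Nat) (hf : l.length ≤ fuel) :
    PySem.Chars.count.go ['*', '*'] fuel l acc = acc + pvStarPairs l := by
  induction fuel generalizing l acc with
  | zero =>
      have : l = [] := List.length_eq_zero_iff.mp (Nat.le_zero.mp hf)
      subst this; simp [PySem.Chars.count.go, pvStarPairs]
  | succ n ih =>
      match l with
      | [] => simp [PySem.Chars.count.go, pvStarPairs]
      | [c] =>
          rw [PySem.Chars.count.go]
          by_cases hc : c = '*'
          · subst hc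
            simp [List.isPrefixOf, pvStarPairs]
            rw [ih [] acc (by simp)]
            simp [pvStarPairs]
          · simp [List.isPrefixOf]
            rw [ih [] acc (by simp)]
            simp [pvStarPairs]
      | c1 :: c2 :: rest =>
          rw [PySem.Chars.count.go]
          by_cases hs : c1 = '*' ∧ c2 = '*'
          · obtain ⟨h1, h2⟩ := hs; subst h1; subst h2
            simp [List.isPrefixOf]
            rw [ih rest (acc + 1) (by simp at hf ⊢; omega)]
            simp [pvStarPairs]; omega
          · have hpre : List.isPrefixOf ['*', '*'] (c1 :: c2 :: rest) = false := by
              simp [List.isPrefixOf]; tauto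
            rw [hpre]
            simp only [Bool.false_eq_true, if_false]
            rw [ih (c2 :: rest) acc (by simp at hf ⊢; omega)]
            simp [pvStarPairs, hs]

theorem charsCount_eq (l : List Char) :
    PySem.Chars.count l ['*', '*'] = pvStarPairs l := by
  rw [PySem.Chars.count]
  simp [countGo_eq l.length l 0 le_rfl]

-- ===== VERDICT (by name: the statement is the Claim_ definition above) =====
theorem count_symbol_usage_spec : Claim_equal_count_symbol_usage := by
  intro e _ hpre
  unfold Spec_count_symbol_usage count_symbol_usage count_symbol_usage_alt
  unfold Pre_count_symbol_usage at hpre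
  simp only [List.all_eq_true] at hpre
  rw [csuGo_eq e.toList 0 hpre]
  have hany : e.toList.any (fun ch => !(pvAllowedTokens.contains ch)) = false := by
    simp only [List.any_eq_false, Bool.not_eq_true', Bool.not_eq_false]
    exact hpre
  rw [hany]
  simp only [Bool.false_eq_true, if_false]
  have : PySem.Str.count e "**" = pvStarPairs e.toList := by
    show PySem.Chars.count e.toList "**".toList = _
    have : "**".toList = ['*', '*'] := rfl
    rw [this, charsCount_eq]
  rw [this]
  simp [PySem.Str.len]
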